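-- pv_equiv track=rewrite | github.com/digeriuz77/2026-dojo-maps | app/services/chat_service.py | _summarize_conversation
-- ===== SOURCE A (Python) =====
-- from typing import Any, Dict, List, Optional, Tuple
--
-- CONTEXT_WINDOW_MESSAGES = 10
--
-- SUMMARY_SNIPPET_LIMIT = 160
--
-- SUMMARY_MAX_BULLETS = 6
--
-- def _compact_text(text: str, limit: int = SUMMARY_SNIPPET_LIMIT) -> str:
--     """Normalize whitespace and trim to a compact snippet."""
--     normalized = " ".join(text.split())
--     if len(normalized) <= limit:
--         return normalized
--     return normalized[: limit - 1].rstrip() + "…"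
--
-- def _dedupe_keep_recent(items: List[str], max_items: int) -> List[str]:
--     """De-duplicate while preserving most recent entries."""
--     seen = set()
--     deduped: List[str] = []
--     for item in reversed(items):
--         key = item.lower()
--         if key in seen:
--             continue
--         seen.add(key)
--         deduped.append(item)
--         if len(deduped) >= max_items:
--             break
--     deduped.reverse()
--     return deduped
--
-- def _summarize_conversation(
--     history: List[Dict[str, str]], max_messages: int = CONTEXT_WINDOW_MESSAGES
-- ) -> Tuple[List[Dict[str, str]], str]:
--     """
--     Manage conversation context to reduce token usage.
--     Returns recent messages and a summary of earlier conversation.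
--
--     Strategy: Keep last N messages in full, summarize earlier ones.
--     """
--     if len(history) <= max_messages:
--         return history, ""
--
--     older_messages = history[:-max_messages]
--     recent_messages = history[-max_messages:]
--
--     practitioner_moves = _dedupe_keep_recent(
--         [_compact_text(msg["content"]) for msg in older_messages if msg["role"] == "user"],
--         SUMMARY_MAX_BULLETS,
--     )
--     client_signals = _dedupe_keep_recent(
--         [_compact_text(msg["content"]) for msg in older_messages if msg["role"] == "assistant"],
--         SUMMARY_MAX_BULLETS,
--     )
--
--     summary_lines: List[str] = []
--     if practitioner_moves:
--         summary_lines.append("Practitioner has already explored:")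
--         summary_lines.extend([f"- {item}" for item in practitioner_moves])
--
--     if client_signals:
--         summary_lines.append("Client has previously expressed:")
--         summary_lines.extend([f"- {item}" for item in client_signals])
--
--     summary = "\n".join(summary_lines)
--     if len(summary) > 1800:
--         summary = summary[:1797].rstrip() + "..."
--
--     return recent_messages, summary
-- ===== SOURCE B (Python) =====
-- from typing import Dict, List, Tuple
--
-- CONTEXT_WINDOW_MESSAGES = 10
--
-- SUMMARY_SNIPPET_LIMIT = 160
--
-- SUMMARY_MAX_BULLETS = 6
--
-- def _compact_text(text: str, limit: int = SUMMARY_SNIPPET_LIMIT) -> str: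
--     """Normalize whitespace and trim to a compact snippet."""
--     normalized = " ".join(text.split())
--     if len(normalized) <= limit:
--         return normalized
--     return normalized[: limit - 1].rstrip() + "…"
--
-- def _summarize_conversation(
--     history: List[Dict[str, str]], max_messages: int = CONTEXT_WINDOW_MESSAGES
-- ) -> Tuple[List[Dict[str, str]], str]:
--     """Single forward pass per role: an insertion-ordered dict with move-to-end
--     keeps the most recent occurrence of each bullet in position order."""
--     if len(history) <= max_messages:
--         return history, ""
--
--     older = history[:-max_messages]
--
--     sections: List[str] = []
--     for role, header in (
--         ("user", "Practitioner has already explored:"),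
--         ("assistant", "Client has previously expressed:"),
--     ):
--         ordered: Dict[str, str] = {}
--         for msg in older:
--             if msg["role"] == role:
--                 text = _compact_text(msg["content"])
--                 key = text.lower()
--                 ordered.pop(key, None)
--                 ordered[key] = text
--         bullets = list(ordered.values())[-SUMMARY_MAX_BULLETS:]
--         if bullets:
--             sections.append(header)
--             sections.extend("- " + b for b in bullets)
--
--     summary = "\n".join(sections)
--     if len(summary) > 1800:
--         summary = summary[:1797].rstrip() + "..."
--
--     return history[-max_messages:], summary
-- ===== Notes on version B (the rewrite author's own statement) =====
-- stated objective: idiomatic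
-- what changed: A dedups each role's bullets with a reversed scan over a seen-set plus early break and a final reverse; B makes one forward pass per role into an insertion-ordered dict with move-to-end (pop+reinsert), takes the last 6 values, and builds both summary sections in a single loop over (role, header) pairs.
import Mathlib
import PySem

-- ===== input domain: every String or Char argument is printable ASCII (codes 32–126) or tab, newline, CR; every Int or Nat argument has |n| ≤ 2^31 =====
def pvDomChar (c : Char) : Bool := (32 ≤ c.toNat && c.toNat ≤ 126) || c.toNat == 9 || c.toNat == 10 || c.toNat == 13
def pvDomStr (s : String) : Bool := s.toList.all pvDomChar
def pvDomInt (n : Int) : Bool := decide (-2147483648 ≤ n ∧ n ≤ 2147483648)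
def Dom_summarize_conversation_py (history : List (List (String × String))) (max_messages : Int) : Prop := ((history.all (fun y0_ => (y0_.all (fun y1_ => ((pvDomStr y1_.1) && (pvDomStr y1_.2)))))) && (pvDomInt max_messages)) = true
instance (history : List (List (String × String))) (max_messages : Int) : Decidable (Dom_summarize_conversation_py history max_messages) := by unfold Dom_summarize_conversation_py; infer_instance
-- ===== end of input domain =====

-- B replaces A's reversed-scan-with-seen-set dedup by a single forward pass with a
-- move-to-end insertion-ordered dict (pop + reinsert), taking the last 6 values, and
-- builds the two summary sections in one loop over (role, header) pairs (objective: idiomatic).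

-- ===== PORT A =====
-- shared helpers: _compact_text and the msg["role"] / msg["content"] lookups are the
-- identical helper code in both Pythons (text handled on List Char; String.mk at the end)
def pvCompact (text : List Char) : List Char :=
  let normalized := PySem.Chars.join [' '] (PySem.Chars.split₀ text)
  if (normalized.length : Int) ≤ 160 then normalized
  else PySem.Chars.rstrip (PySem.List.slice normalized none (some (160 - 1))) ++ ['…']

def pvRoleIs (msg : List (String × String)) (role : String) : Bool :=
  ((PySem.Dict.get? (PySem.Dict.mk msg) "role").getD "") == role

def pvContent (msg : List (String × String)) : List Char :=
  ((PySem.Dict.get? (PySem.Dict.mk msg) "content").getD "").toList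

-- A's _dedupe_keep_recent: scan reversed(items) with a `seen` set, break at max_items
def pvDedupeLoop (rev : List (List Char)) (seen : PySem.Set (List Char))
    (deduped : List (List Char)) (maxItems : Int) : List (List Char) :=
  match rev with
  | [] => deduped
  | item :: rest =>
    let key := PySem.Chars.lower item
    if PySem.Set.contains seen key then pvDedupeLoop rest seen deduped maxItems
    else
      let seen' := PySem.Set.add seen key
      let deduped' := deduped ++ [item]
      if maxItems ≤ (deduped'.length : Int) then deduped'
      else pvDedupeLoop rest seen' deduped' maxItems

def pvDedupeKeepRecent (items : List (List Char)) (maxItems : Int) : List (List Char) :=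
  (pvDedupeLoop items.reverse [] [] maxItems).reverse

def summarize_conversation_py (history : List (List (String × String))) (max_messages : Int) :
    (List (List (String × String))) × String :=
  if (history.length : Int) ≤ max_messages then (history, "")
  else
    let older := PySem.List.slice history none (some (-max_messages))
    let recent := PySem.List.slice history (some (-max_messages)) none
    let practitioner_moves :=
      pvDedupeKeepRecent
        ((older.filter (fun msg => pvRoleIs msg "user")).map (fun msg => pvCompact (pvContent msg))) 6
    let client_signals :=
      pvDedupeKeepRecent
        ((older.filter (fun msg => pvRoleIs msg "assistant")).map (fun msg => pvCompact (pvContent msg))) 6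
    let lines1 : List (List Char) :=
      if practitioner_moves ≠ [] then
        ["Practitioner has already explored:".toList] ++
          practitioner_moves.map (fun item => "- ".toList ++ item)
      else []
    let lines2 : List (List Char) :=
      if client_signals ≠ [] then
        lines1 ++ ["Client has previously expressed:".toList] ++
          client_signals.map (fun item => "- ".toList ++ item)
      else lines1
    let summary := PySem.Chars.join ['\n'] lines2
    let summary' :=
      if (1800 : Int) < (summary.length : Int) then
        PySem.Chars.rstrip (PySem.List.slice summary none (some 1797)) ++ "...".toList
      else summary
    (recent, String.ofList summary')

-- ===== PORT B =====
-- B's move-to-end step: ordered.pop(key, None); ordered[key] = text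
def pvMoveToEnd (d : PySem.Dict (List Char) (List Char)) (text : List Char) :
    PySem.Dict (List Char) (List Char) :=
  let key := PySem.Chars.lower text
  (d.erase key).insert key text

def summarize_conversation_py_alt (history : List (List (String × String))) (max_messages : Int) :
    (List (List (String × String))) × String :=
  if (history.length : Int) ≤ max_messages then (history, "")
  else
    let older := PySem.List.slice history none (some (-max_messages))
    let sections :=
      [("user", "Practitioner has already explored:".toList),
       ("assistant", "Client has previously expressed:".toList)].foldl
        (fun acc rh =>
          let ordered := older.foldl
            (fun d msg => if pvRoleIs msg rh.1 then pvMoveToEnd d (pvCompact (pvContent msg)) else d)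
            (PySem.Dict.mk [])
          let bullets := PySem.List.slice ordered.values (some (-6)) none
          if bullets ≠ [] then acc ++ [rh.2] ++ bullets.map (fun b => "- ".toList ++ b) else acc)
        []
    let summary := PySem.Chars.join ['\n'] sections
    let summary' :=
      if (1800 : Int) < (summary.length : Int) then
        PySem.Chars.rstrip (PySem.List.slice summary none (some 1797)) ++ "...".toList
      else summary
    (PySem.List.slice history (some (-max_messages)) none, String.ofList summary')

-- ===== PRECONDITION & SPEC =====
-- Pre_ excludes exactly the inputs where Python A raises KeyError: a message in the
-- summarized (older) part lacking "role", or a user/assistant message lacking "content".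
-- (Both ports total these lookups with the same getD "" default, so the proved equality
-- happens to hold even outside Pre_; Pre_ marks where the ports are faithful to Python.)
def Pre_summarize_conversation_py (history : List (List (String × String))) (max_messages : Int) : Prop :=
  (history.length : Int) ≤ max_messages ∨
    ∀ msg ∈ PySem.List.slice history none (some (-max_messages)),
      (PySem.Dict.get? (PySem.Dict.mk msg) "role").isSome = true ∧
      ((PySem.Dict.get? (PySem.Dict.mk msg) "role" = some "user" ∨
        PySem.Dict.get? (PySem.Dict.mk msg) "role" = some "assistant") →
        (PySem.Dict.get? (PySem.Dict.mk msg) "content").isSome = true)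

instance (history : List (List (String × String))) (max_messages : Int) :
    Decidable (Pre_summarize_conversation_py history max_messages) := by
  unfold Pre_summarize_conversation_py; infer_instance

def pvWitness_summarize_conversation_py : (List (List (String × String))) × Int :=
  ([[("role", "user"), ("content", "hi")]], 0)

def Spec_summarize_conversation_py (history : List (List (String × String))) (max_messages : Int)
    (out : (List (List (String × String))) × String) : Prop :=
  out = summarize_conversation_py_alt history max_messages

instance (history : List (List (String × String))) (max_messages : Int)
    (out : (List (List (String × String))) × String) :
    Decidable (Spec_summarize_conversation_py history max_messages out) := by
  unfold Spec_summarize_conversation_py; infer_instance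

-- ===== CLAIM (what is proved, stated in full; the proofs are below) =====
def Claim_equal_summarize_conversation_py : Prop :=
  ∀ (history : List (List (String × String))) (max_messages : Int),
    Dom_summarize_conversation_py history max_messages →
    Pre_summarize_conversation_py history max_messages →
    Spec_summarize_conversation_py history max_messages
      (summarize_conversation_py history max_messages)

-- ===== LEMMAS AND PROOFS =====

-- reference form of the dedup: first occurrence (by lowercased key) scanning left,
-- with an accumulated `seen` list of keys
def pvUniq (seen : List (List Char)) : List (List Char) → List (List Char)
  | [] => []
  | t :: rest =>
    if PySem.Chars.lower t ∈ seen then pvUniq seen rest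
    else t :: pvUniq (PySem.Chars.lower t :: seen) rest

theorem pvUniq_congr {s s' : List (List Char)} (h : ∀ a, a ∈ s ↔ a ∈ s') :
    ∀ l, pvUniq s l = pvUniq s' l := by
  intro l
  induction l generalizing s s' with
  | nil => rfl
  | cons t rest ih =>
    simp only [pvUniq]
    by_cases hm : PySem.Chars.lower t ∈ s
    · rw [if_pos hm, if_pos ((h _).mp hm)]; exact ih h
    · rw [if_neg hm, if_neg (fun hc => hm ((h _).mpr hc))]
      have h' : ∀ a, a ∈ PySem.Chars.lower t :: s ↔ a ∈ PySem.Chars.lower t :: s' := by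
        intro a; simp [h a]
      rw [ih h']

theorem pvUniq_mem_lower_notin {seen : List (List Char)} {l t} (h : t ∈ pvUniq seen l) :
    PySem.Chars.lower t ∉ seen := by
  induction l generalizing seen with
  | nil => simp [pvUniq] at h
  | cons u rest ih =>
    simp only [pvUniq] at h
    by_cases hm : PySem.Chars.lower u ∈ seen
    · rw [if_pos hm] at h; exact ih h
    · rw [if_neg hm] at h
      rcases List.mem_cons.mp h with rfl | h'
      · exact hm
      · have := ih h'
        intro hc; exact this (List.mem_cons_of_mem _ hc)

theorem pvUniq_filter (l : List (List Char)) (seen : List (List Char)) (k : List Char) :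
    (pvUniq seen l).filter (fun t => !(PySem.Chars.lower t == k)) = pvUniq (k :: seen) l := by
  induction l generalizing seen with
  | nil => rfl
  | cons t rest ih =>
    simp only [pvUniq]
    by_cases hm : PySem.Chars.lower t ∈ seen
    · rw [if_pos hm, if_pos (List.mem_cons_of_mem _ hm)]; exact ih seen
    · rw [if_neg hm]
      by_cases hk : PySem.Chars.lower t = k
      · rw [if_pos (by simp [hk])]
        rw [List.filter_cons_of_neg (by simp [hk]), hk]
        apply List.filter_eq_self.mpr
        intro a ha
        have := pvUniq_mem_lower_notin ha
        simp only [List.mem_cons, not_or] at this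
        simp [this.1]
      · rw [if_neg (by simp [hk, hm])]
        rw [List.filter_cons_of_pos (by simp [hk])]
        rw [ih (PySem.Chars.lower t :: seen)]
        exact congrArg _ (pvUniq_congr (by intro a; simp; tauto) rest)

theorem pvMoveToEnd_items (d : PySem.Dict (List Char) (List Char)) (t : List Char) :
    (pvMoveToEnd d t).items
      = d.items.filter (fun p => !(p.1 == PySem.Chars.lower t)) ++ [(PySem.Chars.lower t, t)] := by
  simp [pvMoveToEnd, PySem.Dict.insert, PySem.Dict.contains, PySem.Dict.erase, List.any_filter]

theorem pvDedupeLoop_eq (rev : List (List Char)) :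
    ∀ (seen acc : List (List Char)), acc.length < 6 →
      pvDedupeLoop rev seen acc 6 = acc ++ (pvUniq seen rev).take (6 - acc.length) := by
  induction rev with
  | nil => intro seen acc h; simp [pvDedupeLoop, pvUniq]
  | cons t rest ih =>
    intro seen acc h
    simp only [pvDedupeLoop, pvUniq]
    by_cases hm : PySem.Chars.lower t ∈ seen
    · simp only [PySem.Set.contains, List.contains_eq_mem, hm, decide_true, if_true]
      exact ih seen acc h
    · simp only [PySem.Set.contains, List.contains_eq_mem, hm, decide_false,
        Bool.false_eq_true, if_false]
      have htake : 6 - acc.length = (5 - acc.length) + 1 := by omega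
      rw [htake, List.take_succ_cons]
      by_cases h5 : acc.length = 5
      · have : (6 : Int) ≤ ((acc ++ [t]).length : Int) := by
          simp [List.length_append, h5]
        rw [if_pos this]
        have : 5 - acc.length = 0 := by omega
        simp [this]
      · have hlt : ¬ ((6 : Int) ≤ ((acc ++ [t]).length : Int)) := by
          simp only [List.length_append, List.length_cons, List.length_nil]
          push_cast; omega
        rw [if_neg hlt]
        have hadd : PySem.Set.add seen (PySem.Chars.lower t) = seen ++ [PySem.Chars.lower t] := by
          simp [PySem.Set.add, PySem.Set.contains, List.contains_eq_mem, hm]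
        rw [hadd, ih _ _ (by simp; omega)]
        rw [pvUniq_congr (s' := PySem.Chars.lower t :: seen) (by intro a; simp; tauto) rest]
        have hlen : (acc ++ [t]).length = acc.length + 1 := by simp
        rw [List.append_assoc, List.singleton_append]
        rw [hlen, show 6 - (acc.length + 1) = 5 - acc.length from by omega]

theorem pvFold_items (l : List (List Char)) :
    (l.reverse.foldl pvMoveToEnd (PySem.Dict.mk [])).items
      = ((pvUniq [] l).map (fun t => (PySem.Chars.lower t, t))).reverse := by
  induction l with
  | nil => rfl
  | cons t rest ih =>
    simp only [List.reverse_cons, List.foldl_append, List.foldl_cons, List.foldl_nil]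
    rw [pvMoveToEnd_items, ih]
    simp only [pvUniq, List.not_mem_nil, if_false]
    rw [List.filter_reverse, List.filter_map]
    simp only [Function.comp_def]
    rw [pvUniq_filter]
    simp [List.map_cons, List.reverse_cons]

theorem pvBullets_eq (older : List (List (String × String))) (role : String) :
    pvDedupeKeepRecent
        ((older.filter (fun msg => pvRoleIs msg role)).map (fun msg => pvCompact (pvContent msg))) 6
      = PySem.List.slice
          (older.foldl
            (fun d msg => if pvRoleIs msg role then pvMoveToEnd d (pvCompact (pvContent msg)) else d)
            (PySem.Dict.mk [])).values
          (some (-6)) none := by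
  rw [PySem.List.foldl_if_eq_foldl_filter, ← List.foldl_map (f := fun msg => pvCompact (pvContent msg)) (g := pvMoveToEnd)]
  set texts := (older.filter (fun msg => pvRoleIs msg role)).map (fun msg => pvCompact (pvContent msg)) with htexts
  have hitems := pvFold_items texts.reverse
  rw [List.reverse_reverse] at hitems
  have hvals : (texts.foldl pvMoveToEnd (PySem.Dict.mk [])).values
      = (pvUniq [] texts.reverse).reverse := by
    unfold PySem.Dict.values
    rw [hitems, List.map_reverse, List.map_map]
    simp [Function.comp_def]
  rw [hvals]
  rw [PySem.List.slice_from_neg_ofNat _ 6 (by omega)]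
  unfold pvDedupeKeepRecent
  rw [pvDedupeLoop_eq _ [] [] (by simp)]
  simp [List.reverse_take]

-- ===== VERDICT (by name: the statement is the Claim_ definition above) =====
theorem summarize_conversation_py_spec : Claim_equal_summarize_conversation_py := by
  intro history mm _ _
  unfold Spec_summarize_conversation_py
  simp only [summarize_conversation_py, summarize_conversation_py_alt]
  by_cases hle : (history.length : Int) ≤ mm
  · rw [if_pos hle, if_pos hle]
  · rw [if_neg hle, if_neg hle]
    simp only [List.foldl_cons, List.foldl_nil]
    rw [← pvBullets_eq, ← pvBullets_eq]
    simp only [List.nil_append]
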